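-- pv_equiv track=rewrite | github.com/lonagi/fsociety | 04. Math/ASDN1.py | sdvig
-- ===== SOURCE A (Python) =====
-- def sdvig(x, D):
--     a = x
--     a = a.replace("-0", "1")
--     a = list(a)
--     for _ in range(D):
--         a.insert(2, a[0])
--         a.pop()
--     if a[0] == "1":
--         a[0] = "-"
--         a.insert(1, "0")
--     return "".join(a)
-- ===== SOURCE B (Python) =====
-- def sdvig(x, D):
--     s = x.replace("-0", "1")
--     n = len(s)
--     k = min(max(D, 0), max(n - 2, 0))
--     r = s[:2] + s[0] * k + s[2:n - k]
--     if r[0] == "1":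
--         r = "-0" + r[1:]
--     return r
-- ===== Notes on version B (the rewrite author's own statement) =====
-- stated objective: faster
-- what changed: Replaces A's loop of D insert-at-2/pop-last list mutations by a direct closed-form construction: first two chars, min(D, len-2) copies of the first char, then the truncated tail.
import Mathlib
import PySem

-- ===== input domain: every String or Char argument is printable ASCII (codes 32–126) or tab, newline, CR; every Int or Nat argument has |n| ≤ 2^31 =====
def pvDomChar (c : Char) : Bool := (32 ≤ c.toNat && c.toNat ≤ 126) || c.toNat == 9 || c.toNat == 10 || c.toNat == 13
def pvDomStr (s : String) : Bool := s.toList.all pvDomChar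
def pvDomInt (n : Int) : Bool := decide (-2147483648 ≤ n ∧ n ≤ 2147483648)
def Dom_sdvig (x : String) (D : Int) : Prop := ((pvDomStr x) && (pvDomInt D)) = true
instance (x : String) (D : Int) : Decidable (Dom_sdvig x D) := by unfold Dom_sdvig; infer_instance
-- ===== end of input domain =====

-- B replaces A's D-iteration shift loop by directly building the result in one pass
-- (first two chars, then the shifted-in copies of the first char, then the truncated tail).

-- ===== PORT A =====
-- one iteration of A's loop body: a.insert(2, a[0]); a.pop()
def sdvigStep (a : List Char) : List Char :=
  let a1 := PySem.List.insert a 2 (PySem.List.pyGetD a 0 ' ')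
  ((PySem.List.pop? a1 (-1)).map Prod.snd).getD []

def sdvig (x : String) (D : Int) : String :=
  let a0 := (PySem.Str.replace x "-0" "1").toList
  let a1 := List.foldl (fun a _ => sdvigStep a) a0 (PySem.List.pyRange 0 D 1)
  let a2 := if PySem.List.pyGetD a1 0 ' ' = '1' then
      PySem.List.insert (PySem.List.pySetD a1 0 '-') 1 '0'
    else a1
  String.ofList a2

-- ===== PORT B =====
def sdvig_alt (x : String) (D : Int) : String :=
  let s := (PySem.Str.replace x "-0" "1").toList
  let n : Int := s.length
  let k := min (max D 0) (max (n - 2) 0)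
  let r := PySem.List.slice s none (some 2) ++
           List.replicate k.toNat (PySem.List.pyGetD s 0 ' ') ++
           PySem.List.slice s (some 2) (some (n - k))
  if PySem.List.pyGetD r 0 ' ' = '1' then
    String.ofList ('-' :: '0' :: PySem.List.slice r (some 1) none)
  else
    String.ofList r

-- ===== PRECONDITION & SPEC =====
-- Pre_ excludes only x = "", where the Python A (and B alike) raises IndexError on a[0].
def Pre_sdvig (x : String) (D : Int) : Prop := x ≠ ""
instance (x : String) (D : Int) : Decidable (Pre_sdvig x D) := by unfold Pre_sdvig; infer_instance
def pvWitness_sdvig : String × Int := ("-0123", 2)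

def Spec_sdvig (x : String) (D : Int) (out : String) : Prop := out = sdvig_alt x D
instance (x : String) (D : Int) (out : String) : Decidable (Spec_sdvig x D out) := by unfold Spec_sdvig; infer_instance

-- ===== CLAIM (what is proved, stated in full; the proofs are below) =====
def Claim_equal_sdvig : Prop := ∀ (x : String) (D : Int), Dom_sdvig x D → Pre_sdvig x D → Spec_sdvig x D (sdvig x D)

-- ===== LEMMAS AND PROOFS =====

theorem sdvigStep_nil : sdvigStep [] = [] := by decide

theorem sdvigStep_single (c : Char) : sdvigStep [c] = [c] := by
  simp [sdvigStep, PySem.List.insert, PySem.List.sliceIndices, PySem.List.pop?, PySem.List.pyIdx?]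

theorem sdvigStep_cons (c0 c1 : Char) (t : List Char) :
    sdvigStep (c0 :: c1 :: t) = c0 :: c1 :: (c0 :: t).dropLast := by
  have h2 : (2 : Nat) ≤ (c0 :: c1 :: t).length := by simp
  simp only [sdvigStep, PySem.List.pyGetD_zero_cons, PySem.List.insert_ofNat _ 2 _ h2,
    List.take_succ_cons, List.take_zero, List.drop_succ_cons, List.drop_zero,
    List.nil_append, List.cons_append]
  have := PySem.List.pop?_last ((c0 :: c1 :: c0 :: t).dropLast)
      ((c0 :: c1 :: c0 :: t).getLast (by simp))
  rw [List.dropLast_append_getLast] at this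
  rw [this]
  simp

theorem dropLast_take_of_le (rest : List Char) (j : Nat) (h : j ≤ rest.length) :
    (rest.take j).dropLast = rest.take (j - 1) := by
  rw [List.dropLast_eq_take, List.take_take, List.length_take]
  congr 1
  omega

theorem sdvigStep_iter (c0 c1 : Char) (rest : List Char) (m : Nat) :
    sdvigStep^[m] (c0 :: c1 :: rest) =
      c0 :: c1 :: (List.replicate (min m rest.length) c0 ++ rest.take (rest.length - m)) := by
  induction m with
  | zero => simp
  | succ m ih =>
    rw [Function.iterate_succ_apply', ih, sdvigStep_cons]
    by_cases h : m < rest.length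
    · have h1 : rest.take (rest.length - m) ≠ [] := by
        intro hc
        have := congrArg List.length hc
        simp at this
        omega
      have hmin : min m rest.length = m := by omega
      have hmin2 : min (m + 1) rest.length = m + 1 := by omega
      rw [hmin, hmin2]
      rw [show (c0 :: (List.replicate m c0 ++ rest.take (rest.length - m)))
            = List.replicate (m + 1) c0 ++ rest.take (rest.length - m) from by
          simp [List.replicate_succ]]
      rw [List.dropLast_append_of_ne_nil h1,
        dropLast_take_of_le rest _ (by omega)]
      congr 2
    · have h0 : rest.length - m = 0 := by omega
      have h00 : rest.length - (m + 1) = 0 := by omega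
      have h1 : min m rest.length = rest.length := by omega
      have h2 : min (m + 1) rest.length = rest.length := by omega
      rw [h0, h00, h1, h2]
      simp [← List.replicate_succ, List.dropLast_replicate]

-- the common closed form of the list both ports feed to the final 'if'
theorem core_eq (c0 c1 : Char) (rest : List Char) (D : Int) :
    PySem.List.slice (c0 :: c1 :: rest) none (some 2) ++
      List.replicate (min (max D 0) (max (((c0 :: c1 :: rest).length : Int) - 2) 0)).toNat
        (PySem.List.pyGetD (c0 :: c1 :: rest) 0 ' ') ++
      PySem.List.slice (c0 :: c1 :: rest) (some 2)
        (some (((c0 :: c1 :: rest).length : Int) -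
          min (max D 0) (max (((c0 :: c1 :: rest).length : Int) - 2) 0))) =
    c0 :: c1 :: (List.replicate (min D.toNat rest.length) c0 ++
      rest.take (rest.length - D.toNat)) := by
  have hL : ((c0 :: c1 :: rest).length : Int) = (rest.length : Int) + 2 := by
    simp; omega
  rw [hL, PySem.List.pyGetD_zero_cons]
  have hk : min (max D 0) (max ((rest.length : Int) + 2 - 2) 0)
      = ((min D.toNat rest.length : Nat) : Int) := by omega
  rw [hk]
  rw [PySem.List.slice_to (c0 :: c1 :: rest) (by norm_num : (0:Int) ≤ 2),
    PySem.List.slice_toNat (c0 :: c1 :: rest) (by norm_num : (0:Int) ≤ 2) (by omega)]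
  have ht : ((rest.length : Int) + 2 - ((min D.toNat rest.length : Nat) : Int)).toNat - (2:Int).toNat
      = rest.length - D.toNat := by omega
  rw [ht]
  simp only [show ((2:Int).toNat) = 2 from rfl, List.take_succ_cons, List.take_zero,
    List.drop_succ_cons, List.drop_zero, List.cons_append, List.nil_append,
    Int.toNat_natCast]

-- ===== VERDICT (by name: the statement is the Claim_ definition above) =====
theorem sdvig_spec : Claim_equal_sdvig := by
  intro x D _ _
  unfold Spec_sdvig sdvig sdvig_alt
  simp only [List.foldl_const, PySem.List.length_pyRange_one, Int.sub_zero]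
  rcases hs : (PySem.Str.replace x "-0" "1").toList with _ | ⟨c0, rest0⟩
  · -- empty (unreachable for nonempty x, but both ports agree here anyway)
    have hk : (min (max D 0) (max ((([] : List Char).length : Int) - 2) 0)).toNat = 0 := by
      simp
    simp only [Function.iterate_fixed sdvigStep_nil, hk]
    simp [PySem.List.slice, PySem.List.pyGetD]
    decide
  · rcases rest0 with _ | ⟨c1, rest⟩
    · -- singleton
      have hk : (min (max D 0) (max ((([c0] : List Char).length : Int) - 2) 0)).toNat = 0 := by
        simp
      rw [Function.iterate_fixed (sdvigStep_single c0), hk]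
      have h1 : ((([c0] : List Char).length : Int)
          - min (max D 0) (max ((([c0] : List Char).length : Int) - 2) 0)) = (1 : Int) := by
        simp
      rw [h1]
      by_cases hc : c0 = '1'
      · simp [hc, PySem.List.slice, PySem.List.sliceIndices, PySem.List.clampIdx,
          PySem.List.pySetD, PySem.List.pySet?, PySem.List.insert, PySem.List.pyGetD,
          PySem.List.pyGet?, PySem.List.pyIdx?]
      · simp [hc, PySem.List.slice, PySem.List.clampIdx, PySem.List.pyGetD, PySem.List.pyGet?,
          PySem.List.pyIdx?]
    · -- length ≥ 2
      rw [sdvigStep_iter, core_eq]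
      by_cases hc : c0 = '1'
      · simp only [PySem.List.pyGetD_zero_cons, hc]
        rw [PySem.List.slice_from_one, PySem.List.pySetD_of_nonneg _ _ (by norm_num)]
        simp only [Int.toNat_zero, List.set_cons_zero]
        rw [PySem.List.insert_ofNat _ 1 _ (by simp)]
        simp
      · simp [PySem.List.pyGetD_zero_cons, hc]
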